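-- pv_equiv track=rewrite | github.com/rravell/disjointness | src/linopttools.py | generateVertices1bitOfCommLocalPol
-- ===== SOURCE A (Python) =====
-- import itertools as it
-- from _functools import reduce
--
-- def generateStrategies(outputs):
--     l=list(it.product(list(range(0,max(outputs))),repeat=len(outputs)))
--     return l
--
-- def generateVertices1bitOfCommLocalPol(outputsAlice,outputsBob):
--     communicationStrgs=list(it.product([0,1],repeat=len(outputsAlice)))
--     #strgsAlice = [[[stgAlice[i],comm[i]] for i in range(0,len(stgAlice))]
--     #              for stgAlice in generateStrategies(outputsAlice) for comm in communicationStrgs]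
--     strgsBob = generateStrategies(list(reduce(lambda acum,elem : acum+[elem,elem],outputsBob,[])))
--
--     vertices = []
--     for stgAlice in generateStrategies(outputsAlice):
--         for comm in communicationStrgs:
--             for stgBob in strgsBob:
--                 vector = []
--                 for x in range (0,len(outputsAlice)):
--                     for y in range (0,len(outputsBob)):
--                         for a in range (0,outputsAlice[x]):
--                             for b in range (0,outputsBob[y]):
--                                 if (a==stgAlice[x])&(b==stgBob[2*y+comm[x]]):
--                                     vector.append(1)
--                                 else:
--                                     vector.append(0)
--                 vertices.append(vector)
--     return vertices
-- ===== SOURCE B (Python) =====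
-- def _digits(k, base, n):
--     # base-`base` digits of k, most significant first, length n
--     out = []
--     for _ in range(n):
--         out.append(k % base)
--         k = k // base
--     out.reverse()
--     return out
--
-- def _block(da, db, a, b):
--     if 0 <= a < da and 0 <= b < db:
--         i = a * db + b
--         return [0] * i + [1] + [0] * (da * db - i - 1)
--     return [0] * (da * db if da > 0 and db > 0 else 0)
--
-- def generateVertices1bitOfCommLocalPol(outputsAlice, outputsBob):
--     nX, nY = len(outputsAlice), len(outputsBob)
--     mA, mB = max(outputsAlice), max(outputsBob)
--     if mA <= 0 or mB <= 0:
--         return []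
--     NA, NC, NB = mA ** nX, 2 ** nX, mB ** (2 * nY)
--     vertices = []
--     for k in range(NA * NC * NB):
--         ka, r = divmod(k, NC * NB)
--         kc, kb = divmod(r, NB)
--         sA = _digits(ka, mA, nX)
--         cm = _digits(kc, 2, nX)
--         sB = _digits(kb, mB, 2 * nY)
--         vertices.append([v for x in range(nX) for y in range(nY)
--                          for v in _block(outputsAlice[x], outputsBob[y],
--                                          sA[x], sB[2 * y + cm[x]])])
--     return vertices
-- ===== Notes on version B (the rewrite author's own statement) =====
-- stated objective: alternative
-- what changed: B drops itertools entirely: it runs one flat loop over a single integer index k in range(mA^nX * 2^nX * mB^(2*nY)), decodes k by divmod/mixed-radix digit extraction into the Alice strategy, communication string and Bob strategy, and emits each (x,y) block as a directly constructed one-hot list ([0]*i+[1]+[0]*rest) instead of A's nested cartesian-product enumeration with a per-cell (a,b) equality scan.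
import Mathlib
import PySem

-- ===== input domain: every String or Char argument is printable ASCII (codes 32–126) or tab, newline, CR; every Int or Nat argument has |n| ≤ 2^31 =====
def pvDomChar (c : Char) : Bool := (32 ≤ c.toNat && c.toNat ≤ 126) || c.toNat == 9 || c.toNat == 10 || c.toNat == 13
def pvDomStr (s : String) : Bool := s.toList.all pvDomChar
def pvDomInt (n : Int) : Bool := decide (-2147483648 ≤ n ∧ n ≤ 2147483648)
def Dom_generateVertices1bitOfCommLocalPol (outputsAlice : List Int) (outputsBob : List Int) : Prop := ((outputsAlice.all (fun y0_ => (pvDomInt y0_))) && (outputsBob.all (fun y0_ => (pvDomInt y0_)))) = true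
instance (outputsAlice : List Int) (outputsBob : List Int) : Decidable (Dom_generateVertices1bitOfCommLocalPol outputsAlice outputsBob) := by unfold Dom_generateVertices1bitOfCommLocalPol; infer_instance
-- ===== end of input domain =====

-- B replaces A's itertools-based cartesian enumeration by a single flat loop over one integer
-- index that is decoded by divmod/mixed-radix digit extraction into the three strategy tuples,
-- and builds each (x,y) block as a directly constructed one-hot list instead of scanning every
-- (a,b) output pair; objective: alternative algorithm of the same cost.

-- ===== PORT A =====

-- itertools.product(pool, repeat=n) for a pool of ints (leftmost position varies slowest)
def pvProductRepeat (pool : List Int) : Nat → List (List Int)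
  | 0 => [[]]
  | n + 1 => pool.flatMap (fun x => (pvProductRepeat pool n).map (fun rest => x :: rest))

-- generateStrategies(outputs) = list(product(range(0, max(outputs)), repeat=len(outputs)));
-- max(outputs) ported totally with default 0 (Python raises on []; excluded by Pre_)
def pvGenerateStrategies (outputs : List Int) : List (List Int) :=
  pvProductRepeat (PySem.List.pyRange 0 ((PySem.List.max? outputs (fun y => y)).getD 0) 1) outputs.length

def generateVertices1bitOfCommLocalPol (outputsAlice : List Int) (outputsBob : List Int) : List (List Int) :=
  let communicationStrgs := pvProductRepeat [(0 : Int), 1] outputsAlice.length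
  let strgsBob := pvGenerateStrategies (outputsBob.foldl (fun acum elem => acum ++ [elem, elem]) [])
  (pvGenerateStrategies outputsAlice).foldl (fun vertices stgAlice =>
    communicationStrgs.foldl (fun vertices comm =>
      strgsBob.foldl (fun vertices stgBob =>
        let vector :=
          (PySem.List.pyRange 0 (outputsAlice.length : Int) 1).foldl (fun vec x =>
            (PySem.List.pyRange 0 (outputsBob.length : Int) 1).foldl (fun vec y =>
              (PySem.List.pyRange 0 (PySem.List.pyGetD outputsAlice x 0) 1).foldl (fun vec a =>
                (PySem.List.pyRange 0 (PySem.List.pyGetD outputsBob y 0) 1).foldl (fun vec b =>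
                  vec ++ [if a = PySem.List.pyGetD stgAlice x 0 ∧
                            b = PySem.List.pyGetD stgBob (2 * y + PySem.List.pyGetD comm x 0) 0
                          then (1 : Int) else 0]) vec) vec) vec) []
        vertices ++ [vector]) vertices) vertices) []

-- ===== PORT B =====

-- _digits(k, base, n): collect the n low base-digits of k (LSB first), then reverse
def pvDigitsLoop (k base : Int) : Nat → List Int
  | 0 => []
  | n + 1 => PySem.Int.mod k base :: pvDigitsLoop (PySem.Int.floordiv k base) base n

def pvDigits (k base : Int) (n : Nat) : List Int := (pvDigitsLoop k base n).reverse

-- _block(da, db, a, b): [0]*i + [1] + [0]*(da*db-i-1) when the pair fits, else all zeros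
def pvBlock (da db a b : Int) : List Int :=
  if 0 ≤ a ∧ a < da ∧ 0 ≤ b ∧ b < db then
    List.replicate (a * db + b).toNat 0 ++ [1] ++ List.replicate (da * db - (a * db + b) - 1).toNat 0
  else
    List.replicate (if 0 < da ∧ 0 < db then (da * db).toNat else 0) 0

def generateVertices1bitOfCommLocalPol_alt (outputsAlice : List Int) (outputsBob : List Int) : List (List Int) :=
  let nX := outputsAlice.length
  let nY := outputsBob.length
  let mA := (PySem.List.max? outputsAlice (fun y => y)).getD 0
  let mB := (PySem.List.max? outputsBob (fun y => y)).getD 0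
  if mA ≤ 0 ∨ mB ≤ 0 then []
  else
    let NC := (2 : Int) ^ nX
    let NB := mB ^ (2 * nY)
    (PySem.List.pyRange 0 (mA ^ nX * NC * NB) 1).map (fun k =>
      let ka := PySem.Int.floordiv k (NC * NB)
      let r := PySem.Int.mod k (NC * NB)
      let kc := PySem.Int.floordiv r NB
      let kb := PySem.Int.mod r NB
      let sA := pvDigits ka mA nX
      let cm := pvDigits kc 2 nX
      let sB := pvDigits kb mB (2 * nY)
      (PySem.List.pyRange 0 (nX : Int) 1).flatMap (fun x =>
        (PySem.List.pyRange 0 (nY : Int) 1).flatMap (fun y =>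
          pvBlock (PySem.List.pyGetD outputsAlice x 0) (PySem.List.pyGetD outputsBob y 0)
            (PySem.List.pyGetD sA x 0)
            (PySem.List.pyGetD sB (2 * y + PySem.List.pyGetD cm x 0) 0))))

-- ===== PRECONDITION & SPEC =====
-- Pre_ excludes exactly the inputs where Python A raises: max() on an empty sequence
-- (outputsAlice = [] directly, outputsBob = [] through the doubled list) is a ValueError.
def Pre_generateVertices1bitOfCommLocalPol (outputsAlice : List Int) (outputsBob : List Int) : Prop :=
  outputsAlice ≠ [] ∧ outputsBob ≠ []
instance (outputsAlice : List Int) (outputsBob : List Int) : Decidable (Pre_generateVertices1bitOfCommLocalPol outputsAlice outputsBob) := by unfold Pre_generateVertices1bitOfCommLocalPol; infer_instance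

def pvWitness_generateVertices1bitOfCommLocalPol : List Int × List Int := ([2, 1], [2])

def Spec_generateVertices1bitOfCommLocalPol (outputsAlice : List Int) (outputsBob : List Int) (out : List (List Int)) : Prop := out = generateVertices1bitOfCommLocalPol_alt outputsAlice outputsBob
instance (outputsAlice : List Int) (outputsBob : List Int) (out : List (List Int)) : Decidable (Spec_generateVertices1bitOfCommLocalPol outputsAlice outputsBob out) := by unfold Spec_generateVertices1bitOfCommLocalPol; infer_instance

-- ===== CLAIM (what is proved, stated in full; the proofs are below) =====
def Claim_equal_generateVertices1bitOfCommLocalPol : Prop := ∀ (outputsAlice : List Int) (outputsBob : List Int), Dom_generateVertices1bitOfCommLocalPol outputsAlice outputsBob → Pre_generateVertices1bitOfCommLocalPol outputsAlice outputsBob → Spec_generateVertices1bitOfCommLocalPol outputsAlice outputsBob (generateVertices1bitOfCommLocalPol outputsAlice outputsBob)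

-- ===== LEMMAS AND PROOFS =====

-- MSB-first base-m digit list of length n (proof-side normal form of both enumerations)
def pvDec (m : Nat) : Nat → Nat → List Int
  | 0, _ => []
  | n + 1, k => ((k / m ^ n : Nat) : Int) :: pvDec m n (k % m ^ n)

-- range(a*b) as the lexicographic double loop
theorem pvRangeMul (a b : Nat) :
    List.range (a * b) = (List.range a).flatMap (fun q => (List.range b).map (fun s => q * b + s)) := by
  induction a with
  | zero => simp
  | succ a ih =>
    rw [Nat.succ_mul, List.range_add, ih, List.range_succ, List.flatMap_append]
    simp [List.flatMap_cons, Nat.add_comm]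

-- peeling the LAST digit of a length-(n+1) digit string
theorem pvDecSnoc (m n k : Nat) (hk : k < m ^ (n + 1)) :
    pvDec m (n + 1) k = pvDec m n (k / m) ++ [((k % m : Nat) : Int)] := by
  induction n generalizing k with
  | zero =>
    simp only [pvDec, pow_zero, Nat.div_one, List.nil_append]
    rw [Nat.mod_eq_of_lt (by simpa using hk)]
  | succ n ih =>
    show ((k / m ^ (n + 1) : Nat) : Int) :: pvDec m (n + 1) (k % m ^ (n + 1)) = _
    have hm : 0 < m := by
      rcases Nat.eq_zero_or_pos m with h | h
      · subst h; rw [Nat.zero_pow (by omega)] at hk; omega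
      · exact h
    have hp : 0 < m ^ (n + 1) := pow_pos hm (n + 1)
    rw [ih (k % m ^ (n + 1)) (Nat.mod_lt _ hp)]
    have h1 : k % m ^ (n + 1) % m = k % m :=
      Nat.mod_mod_of_dvd k (dvd_pow_self m (Nat.succ_ne_zero n))
    have h2 : k % m ^ (n + 1) / m = k / m % m ^ n := by
      rw [pow_succ, mul_comm, Nat.mod_mul_right_div_self]
    have h3 : k / m ^ (n + 1) = k / m / m ^ n := by
      rw [Nat.div_div_eq_div_mul, ← pow_succ']
    show _ = ((k / m / m ^ n : Nat) : Int) :: pvDec m n (k / m % m ^ n) ++ _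
    rw [h1, h2, h3]
    rfl

-- the digit loop of B computes pvDec (reversed)
theorem pvDigitsLoop_eq (m : Nat) (hm : 0 < m) : ∀ (n k : Nat), k < m ^ n →
    pvDigitsLoop (k : Int) (m : Int) n = (pvDec m n k).reverse := by
  intro n
  induction n with
  | zero => intro k _; rfl
  | succ n ih =>
    intro k hk
    show PySem.Int.mod (k : Int) (m : Int) :: pvDigitsLoop (PySem.Int.floordiv (k : Int) (m : Int)) (m : Int) n = _
    rw [PySem.Int.mod_natCast, PySem.Int.floordiv_natCast,
      ih (k / m) (by rwa [Nat.div_lt_iff_lt_mul hm, ← pow_succ]),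
      pvDecSnoc m n k hk]
    simp

theorem pvDigits_eq (m : Nat) (hm : 0 < m) (n k : Nat) (hk : k < m ^ n) :
    pvDigits (k : Int) (m : Int) n = pvDec m n k := by
  unfold pvDigits
  rw [pvDigitsLoop_eq m hm n k hk, List.reverse_reverse]

-- itertools.product appends the LAST coordinate fastest
theorem pvProductRepeat_snoc (pool : List Int) (n : Nat) :
    pvProductRepeat pool (n + 1) =
      (pvProductRepeat pool n).flatMap (fun p => pool.map (fun x => p ++ [x])) := by
  induction n with
  | zero =>
    simp only [pvProductRepeat, List.map_cons, List.map_nil, List.flatMap_cons, List.flatMap_nil,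
      List.append_nil, List.nil_append]
    exact List.map_eq_flatMap.symm
  | succ n ih =>
    conv_lhs => rw [show pvProductRepeat pool (n + 2) =
      pool.flatMap (fun x => (pvProductRepeat pool (n + 1)).map (fun rest => x :: rest)) from rfl, ih]
    conv_rhs => rw [show pvProductRepeat pool (n + 1) =
      pool.flatMap (fun x => (pvProductRepeat pool n).map (fun rest => x :: rest)) from rfl]
    simp [List.map_flatMap, List.flatMap_map, List.map_map, List.flatMap_assoc,
      Function.comp_def, List.cons_append]

-- product(range(m), repeat=n) is the mixed-radix decode of range(m^n)
theorem pvProductRepeat_eq_decode (m : Nat) (n : Nat) :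
    pvProductRepeat (PySem.List.pyRange 0 (m : Int) 1) n =
      (List.range (m ^ n)).map (pvDec m n) := by
  induction n with
  | zero => simp [pvProductRepeat, pvDec]
  | succ n ih =>
    rw [pvProductRepeat_snoc, ih, pow_succ, pvRangeMul]
    rw [PySem.List.pyRange_one]
    simp only [Int.sub_zero, Int.toNat_natCast, zero_add, List.flatMap_map, List.map_flatMap,
      List.map_map, Function.comp_def]
    apply List.flatMap_congr
    intro q hq
    rw [List.mem_range] at hq
    apply List.map_congr_left
    intro s hs
    rw [List.mem_range] at hs
    have hlt : q * m + s < m ^ (n + 1) := by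
      calc q * m + s < q * m + m := by omega
        _ = (q + 1) * m := by ring
        _ ≤ m ^ n * m := Nat.mul_le_mul_right m (by omega)
        _ = m ^ (n + 1) := (pow_succ m n).symm
    rw [pvDecSnoc m n (q * m + s) hlt]
    have hd : (q * m + s) / m = q := by
      rcases Nat.eq_zero_or_pos m with h | h
      · omega
      · rw [Nat.add_comm, Nat.add_mul_div_right s q h, Nat.div_eq_of_lt hs]; omega
    have hm' : (q * m + s) % m = s := by
      rw [Nat.add_comm, Nat.add_mul_mod_self_right, Nat.mod_eq_of_lt hs]
    rw [hd, hm']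

-- a row of a block: one ite-cell per b < m
theorem pvRowEq (m j : Nat) (c : Prop) [Decidable c] :
    (List.range m).map (fun b => if c ∧ b = j then (1 : Int) else 0) =
      if c ∧ j < m then (List.replicate m (0 : Int)).set j 1 else List.replicate m 0 := by
  apply List.ext_getElem
  · simp; split_ifs <;> simp
  · intro i h1 h2
    simp only [List.getElem_map, List.getElem_range]
    by_cases hc : c
    · by_cases hj : j < m
      · simp only [hc, hj, and_true, true_and, if_true]
        rw [List.getElem_set]
        by_cases hij : i = j
        · simp [hij]
        · simp [hij, Ne.symm hij]
      · simp only [hc, hj, and_false, true_and, if_false]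
        simp only [List.length_map, List.length_range] at h1
        have : ¬ i = j := by omega
        simp [this]
    · simp [hc]

-- the pure-Nat form of the block identity
theorem pvNatBlock (n m k j : Nat) :
    (List.range n).flatMap (fun a => (List.range m).map (fun b => if a = k ∧ b = j then (1 : Int) else 0)) =
      if k < n ∧ j < m then (List.replicate (n * m) (0 : Int)).set (k * m + j) 1
      else List.replicate (n * m) 0 := by
  induction n with
  | zero => simp
  | succ n ih =>
    rw [List.range_succ, List.flatMap_append, ih]
    simp only [List.flatMap_cons, List.flatMap_nil, List.append_nil]
    rw [pvRowEq m j (n = k)]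
    by_cases hj : j < m
    · rcases Nat.lt_trichotomy k n with hk | hk | hk
      · have h1 : k < n ∧ j < m := ⟨hk, hj⟩
        have h2 : k < n + 1 ∧ j < m := ⟨by omega, hj⟩
        have hne : ¬ (n = k) := by omega
        simp only [h1, h2, hne, and_true, if_false, if_pos]
        have hlt : k * m + j < n * m := by
          calc k * m + j < k * m + m := by omega
          _ = (k + 1) * m := by ring
          _ ≤ n * m := Nat.mul_le_mul_right m (by omega)
        rw [Nat.succ_mul, List.replicate_add, List.set_append_left _ _ (by simpa using hlt)]
      · subst hk
        have h2 : k < k + 1 ∧ j < m := ⟨by omega, hj⟩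
        simp only [h2, if_true, true_and]
        rw [Nat.succ_mul, List.replicate_add]
        rw [List.set_append_right _ _ (by simp)]
        simp
      · have h1 : ¬ (k < n ∧ j < m) := by omega
        have h2 : ¬ (k < n + 1 ∧ j < m) := by omega
        have hne : ¬ (n = k) := by omega
        simp only [h1, h2, hne, if_false, false_and]
        rw [Nat.succ_mul, List.replicate_add]
    · have h1 : ¬ (k < n ∧ j < m) := by omega
      have h2 : ¬ (k < n + 1 ∧ j < m) := by omega
      have h3 : ¬ ((n = k) ∧ j < m) := by omega
      simp only [h1, h2, h3, if_false]
      rw [Nat.succ_mul, List.replicate_add]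

-- writing a 1 into a zero list is the concatenation form pvBlock uses
theorem pvSetReplicate (n j : Nat) (hj : j < n) :
    (List.replicate n (0 : Int)).set j 1 =
      List.replicate j 0 ++ [1] ++ List.replicate (n - j - 1) 0 := by
  induction j generalizing n with
  | zero =>
    cases n with
    | zero => omega
    | succ n => simp [List.replicate_succ]
  | succ j ih =>
    cases n with
    | zero => omega
    | succ n =>
      simp only [List.replicate_succ, List.set_cons_succ, ih n (by omega)]
      simp

-- pvBlock in replicate/set form
theorem pvBlock_eq_set (da db sa sb : Int) :
    pvBlock da db sa sb =
      if 0 ≤ sa ∧ sa < (da.toNat : Int) ∧ 0 ≤ sb ∧ sb < (db.toNat : Int) then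
        (List.replicate (da.toNat * db.toNat) (0 : Int)).set (sa * db + sb).toNat 1
      else List.replicate (da.toNat * db.toNat) 0 := by
  unfold pvBlock
  have hrep : (if 0 < da ∧ 0 < db then (da * db).toNat else 0) = da.toNat * db.toNat := by
    split_ifs with h
    · rw [Int.toNat_mul (by omega) (by omega)]
    · have : da.toNat = 0 ∨ db.toNat = 0 := by omega
      rcases this with h' | h' <;> simp [h']
  have hc : (0 ≤ sa ∧ sa < da ∧ 0 ≤ sb ∧ sb < db) ↔
      (0 ≤ sa ∧ sa < (da.toNat : Int) ∧ 0 ≤ sb ∧ sb < (db.toNat : Int)) := by omega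
  rw [hrep]
  simp only [hc]
  split_ifs with h
  · obtain ⟨h1, h2, h3, h4⟩ := h
    have hdb : 0 < db := by omega
    have hda : 0 < da := by omega
    have key : (sa + 1) * db ≤ da * db := mul_le_mul_of_nonneg_right (by omega) (le_of_lt hdb)
    have h4' : sb < db := by omega
    have hlt2 : sa * db + sb < da * db := by nlinarith [key, h4']
    have h0 : 0 ≤ sa * db + sb := add_nonneg (mul_nonneg h1 (le_of_lt hdb)) h3
    have hprod : ((da.toNat * db.toNat : Nat) : Int) = da * db := by
      push_cast; rw [Int.toNat_of_nonneg (le_of_lt hda), Int.toNat_of_nonneg (le_of_lt hdb)]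
    have hidx : (sa * db + sb).toNat < da.toNat * db.toNat := by omega
    rw [pvSetReplicate _ _ hidx]
    have e1 : da * db - (sa * db + sb) - 1 = ((da.toNat * db.toNat - (sa * db + sb).toNat - 1 : Nat) : Int) := by
      omega
    rw [e1, Int.toNat_natCast]
  · rfl

-- a block none of whose cells matches the sampled strategy pair is all zeros
theorem pvZeroBlock (da db sa sb : Int)
    (h : ∀ a b : Nat, a < da.toNat → b < db.toNat → ¬ ((a : Int) = sa ∧ (b : Int) = sb)) :
    (List.range da.toNat).flatMap (fun (a : Nat) =>
        (List.range db.toNat).map (fun (b : Nat) => if (a : Int) = sa ∧ (b : Int) = sb then (1 : Int) else 0)) =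
      List.replicate (da.toNat * db.toNat) 0 := by
  have hlen : ((List.range da.toNat).flatMap (fun (a : Nat) =>
      (List.range db.toNat).map (fun (b : Nat) => if (a : Int) = sa ∧ (b : Int) = sb then (1 : Int) else 0))).length
      = da.toNat * db.toNat := by
    simp [List.length_flatMap, List.map_const', List.sum_replicate, smul_eq_mul]
  rw [← hlen]
  apply List.eq_replicate_of_mem
  intro x hx
  simp only [List.mem_flatMap, List.mem_map, List.mem_range] at hx
  obtain ⟨a, ha, b, hb, rfl⟩ := hx
  simp [h a b ha hb]

-- A's per-cell double scan over one (x,y) block equals B's directly built one-hot block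
theorem pvBlockEq (da db sa sb : Int) :
    (PySem.List.pyRange 0 da 1).flatMap (fun a =>
        (PySem.List.pyRange 0 db 1).map (fun b => if a = sa ∧ b = sb then (1 : Int) else 0)) =
      pvBlock da db sa sb := by
  rw [pvBlock_eq_set, PySem.List.pyRange_one 0 da, PySem.List.pyRange_one 0 db]
  simp only [Int.sub_zero, zero_add, List.flatMap_map, List.map_map, Function.comp_def]
  by_cases hsa : 0 ≤ sa
  · by_cases hsb : 0 ≤ sb
    · obtain ⟨k, rfl⟩ : ∃ k : Nat, sa = (k : Int) := ⟨sa.toNat, (Int.toNat_of_nonneg hsa).symm⟩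
      obtain ⟨j, rfl⟩ : ∃ j : Nat, sb = (j : Int) := ⟨sb.toNat, (Int.toNat_of_nonneg hsb).symm⟩
      simp only [Nat.cast_inj]
      rw [pvNatBlock da.toNat db.toNat k j]
      have hcond : ((0 : Int) ≤ (k : Int) ∧ (k : Int) < (da.toNat : Int) ∧ (0 : Int) ≤ (j : Int) ∧ (j : Int) < (db.toNat : Int)) ↔ (k < da.toNat ∧ j < db.toNat) := by omega
      simp only [hcond]
      by_cases hin : k < da.toNat ∧ j < db.toNat
      · have hdb : 0 < db := by omega
        have hidx : ((k : Int) * db + j).toNat = k * db.toNat + j := by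
          have : ((k : Int) * db + j) = ((k * db.toNat + j : Nat) : Int) := by
            push_cast [Int.toNat_of_nonneg (le_of_lt hdb)]; ring
          rw [this, Int.toNat_natCast]
        rw [if_pos hin, if_pos hin, hidx]
      · rw [if_neg hin, if_neg hin]
    · have hfalse : ¬ (0 ≤ sa ∧ sa < (da.toNat : Int) ∧ 0 ≤ sb ∧ sb < (db.toNat : Int)) := by omega
      rw [if_neg hfalse]
      exact pvZeroBlock da db sa sb (by intro a b _ _; omega)
  · have hfalse : ¬ (0 ≤ sa ∧ sa < (da.toNat : Int) ∧ 0 ≤ sb ∧ sb < (db.toNat : Int)) := by omega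
    rw [if_neg hfalse]
    exact pvZeroBlock da db sa sb (by intro a b _ _; omega)

-- running max ignores the duplication of every element
theorem pvFoldlMaxDouble (t : List Int) : ∀ a : Int,
    (t.flatMap (fun e => [e, e])).foldl max a = t.foldl max a := by
  induction t with
  | nil => intro a; rfl
  | cons e t ih =>
    intro a
    simp only [List.flatMap_cons, List.cons_append, List.nil_append, List.foldl_cons]
    rw [max_assoc] at *
    simp only [max_self]
    exact ih (max a e)

-- A's reduce-doubled Bob strategy space is the plain product over 2*len(outputsBob) positions
theorem pvBobEq (outputsBob : List Int) :
    pvGenerateStrategies (outputsBob.foldl (fun acum elem => acum ++ [elem, elem]) []) =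
      pvProductRepeat (PySem.List.pyRange 0 ((PySem.List.max? outputsBob (fun y => y)).getD 0) 1) (2 * outputsBob.length) := by
  rw [PySem.List.foldl_append_eq_flatMap, List.nil_append]
  unfold pvGenerateStrategies
  have hlen : (outputsBob.flatMap (fun e => [e, e])).length = 2 * outputsBob.length := by
    induction outputsBob with
    | nil => rfl
    | cons e t ih => simp only [List.flatMap_cons, List.cons_append, List.nil_append, List.length_cons] at *; omega
  have hmax : (PySem.List.max? (outputsBob.flatMap (fun e => [e, e])) (fun y => y)).getD 0 =
      (PySem.List.max? outputsBob (fun y => y)).getD 0 := by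
    cases outputsBob with
    | nil => rfl
    | cons h t =>
      simp only [List.flatMap_cons, List.cons_append, List.nil_append]
      rw [PySem.List.max?_id_cons, PySem.List.max?_id_cons]
      simp only [Option.getD_some, List.foldl_cons, max_self]
      exact pvFoldlMaxDouble t h
  rw [hlen, hmax]

-- the vertex of one strategy triple, as both normal forms share it
def pvVec (oa ob sA cm sB : List Int) : List Int :=
  (PySem.List.pyRange 0 (oa.length : Int) 1).flatMap (fun x =>
    (PySem.List.pyRange 0 (ob.length : Int) 1).flatMap (fun y =>
      pvBlock (PySem.List.pyGetD oa x 0) (PySem.List.pyGetD ob y 0)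
        (PySem.List.pyGetD sA x 0)
        (PySem.List.pyGetD sB (2 * y + PySem.List.pyGetD cm x 0) 0)))

-- A in flatMap normal form
theorem pvANormal (oa ob : List Int) :
    generateVertices1bitOfCommLocalPol oa ob =
      (pvProductRepeat (PySem.List.pyRange 0 ((PySem.List.max? oa (fun y => y)).getD 0) 1) oa.length).flatMap (fun sA =>
        (pvProductRepeat [(0 : Int), 1] oa.length).flatMap (fun c =>
          (pvProductRepeat (PySem.List.pyRange 0 ((PySem.List.max? ob (fun y => y)).getD 0) 1) (2 * ob.length)).map
            (fun sB => pvVec oa ob sA c sB))) := by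
  unfold generateVertices1bitOfCommLocalPol
  rw [pvBobEq]
  unfold pvGenerateStrategies
  simp only [PySem.List.foldl_append_singleton_eq_map, PySem.List.foldl_append_eq_flatMap,
    List.nil_append, pvBlockEq, pvVec]

-- base-2 digit bridge (the literal 2 of B's port)
theorem pvDigits2_eq (n k : Nat) (hk : k < 2 ^ n) :
    pvDigits (k : Int) 2 n = pvDec 2 n k := by
  have h := pvDigits_eq 2 (by norm_num) n k hk
  simpa using h

-- B in the same normal form (strategies decoded from the flat index)
theorem pvAltNormal (oa ob : List Int) (a b : Nat) (ha : 0 < a) (hb : 0 < b)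
    (hmA : (PySem.List.max? oa (fun y => y)).getD 0 = (a : Int))
    (hmB : (PySem.List.max? ob (fun y => y)).getD 0 = (b : Int)) :
    generateVertices1bitOfCommLocalPol_alt oa ob =
      (List.range (a ^ oa.length)).flatMap (fun i =>
        (List.range (2 ^ oa.length)).flatMap (fun jc =>
          (List.range (b ^ (2 * ob.length))).map (fun jb =>
            pvVec oa ob (pvDec a oa.length i) (pvDec 2 oa.length jc) (pvDec b (2 * ob.length) jb)))) := by
  have hA0 : ¬ ((a : Int) ≤ 0 ∨ (b : Int) ≤ 0) := by omega
  unfold generateVertices1bitOfCommLocalPol_alt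
  simp only [hmA, hmB]
  rw [if_neg hA0]
  have hbound : (a : Int) ^ oa.length * (2 : Int) ^ oa.length * (b : Int) ^ (2 * ob.length) =
      ((a ^ oa.length * 2 ^ oa.length * b ^ (2 * ob.length) : Nat) : Int) := by push_cast; ring
  rw [hbound, PySem.List.pyRange_one 0 ((a ^ oa.length * 2 ^ oa.length * b ^ (2 * ob.length) : Nat) : Int)]
  simp only [Int.sub_zero, Int.toNat_natCast, zero_add]
  rw [pvRangeMul (a ^ oa.length * 2 ^ oa.length) (b ^ (2 * ob.length)),
    pvRangeMul (a ^ oa.length) (2 ^ oa.length)]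
  simp only [List.map_flatMap, List.map_map, List.flatMap_assoc, List.flatMap_map,
    Function.comp_def]
  have hTB : 0 < b ^ (2 * ob.length) := pow_pos hb _
  have hTC : 0 < (2 : Nat) ^ oa.length := pow_pos (by norm_num) _
  apply List.flatMap_congr
  intro i hi
  rw [List.mem_range] at hi
  apply List.flatMap_congr
  intro jc hjc
  rw [List.mem_range] at hjc
  apply List.map_congr_left
  intro jb hjb
  rw [List.mem_range] at hjb
  have eM : (2 : Int) ^ oa.length * ((b ^ (2 * ob.length) : Nat) : Int) =
      ((2 ^ oa.length * b ^ (2 * ob.length) : Nat) : Int) := by push_cast; ring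
  have eB : ((b : Int)) ^ (2 * ob.length) = ((b ^ (2 * ob.length) : Nat) : Int) := by push_cast; ring
  have hrem : jc * b ^ (2 * ob.length) + jb < 2 ^ oa.length * b ^ (2 * ob.length) := by
    calc jc * b ^ (2 * ob.length) + jb < jc * b ^ (2 * ob.length) + b ^ (2 * ob.length) := by omega
      _ = (jc + 1) * b ^ (2 * ob.length) := by ring
      _ ≤ 2 ^ oa.length * b ^ (2 * ob.length) := Nat.mul_le_mul_right _ (by omega)
  have hk : (i * 2 ^ oa.length + jc) * b ^ (2 * ob.length) + jb =
      (2 ^ oa.length * b ^ (2 * ob.length)) * i + (jc * b ^ (2 * ob.length) + jb) := by ring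
  have hdiv1 : ((i * 2 ^ oa.length + jc) * b ^ (2 * ob.length) + jb) /
      (2 ^ oa.length * b ^ (2 * ob.length)) = i := by
    rw [hk, Nat.mul_add_div (by positivity), Nat.div_eq_of_lt hrem, Nat.add_zero]
  have hmod1 : ((i * 2 ^ oa.length + jc) * b ^ (2 * ob.length) + jb) %
      (2 ^ oa.length * b ^ (2 * ob.length)) = jc * b ^ (2 * ob.length) + jb := by
    rw [hk, Nat.mul_add_mod, Nat.mod_eq_of_lt hrem]
  have hdiv2 : (jc * b ^ (2 * ob.length) + jb) / b ^ (2 * ob.length) = jc := by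
    rw [show jc * b ^ (2 * ob.length) + jb = b ^ (2 * ob.length) * jc + jb by ring,
      Nat.mul_add_div hTB, Nat.div_eq_of_lt hjb, Nat.add_zero]
  have hmod2 : (jc * b ^ (2 * ob.length) + jb) % b ^ (2 * ob.length) = jb := by
    rw [show jc * b ^ (2 * ob.length) + jb = b ^ (2 * ob.length) * jc + jb by ring,
      Nat.mul_add_mod, Nat.mod_eq_of_lt hjb]
  simp only [eB, eM, PySem.Int.floordiv_natCast, PySem.Int.mod_natCast,
    hdiv1, hmod1, hdiv2, hmod2,
    pvDigits_eq a ha oa.length i hi, pvDigits2_eq oa.length jc hjc,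
    pvDigits_eq b hb (2 * ob.length) jb hjb, pvVec]

-- ===== VERDICT (by name: the statement is the Claim_ definition above) =====
theorem generateVertices1bitOfCommLocalPol_spec : Claim_equal_generateVertices1bitOfCommLocalPol := by
  intro oa ob _ hpre
  obtain ⟨ha, hb⟩ := hpre
  unfold Spec_generateVertices1bitOfCommLocalPol
  by_cases hg : (PySem.List.max? oa (fun y => y)).getD 0 ≤ 0 ∨ (PySem.List.max? ob (fun y => y)).getD 0 ≤ 0
  · -- degenerate pools: both sides are []
    have hBnil : generateVertices1bitOfCommLocalPol_alt oa ob = [] := by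
      unfold generateVertices1bitOfCommLocalPol_alt
      rw [if_pos hg]
    rw [hBnil, pvANormal]
    rcases hg with hg | hg
    · rw [PySem.List.pyRange_one_eq_nil hg]
      obtain ⟨x, t, rfl⟩ := List.exists_cons_of_ne_nil ha
      simp [pvProductRepeat]
    · rw [PySem.List.pyRange_one_eq_nil hg]
      obtain ⟨x, t, rfl⟩ := List.exists_cons_of_ne_nil hb
      simp [pvProductRepeat]
  · obtain ⟨a, haa⟩ : ∃ a : Nat, (PySem.List.max? oa (fun y => y)).getD 0 = (a : Int) :=
      ⟨_, (Int.toNat_of_nonneg (by omega)).symm⟩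
    obtain ⟨b, hbb⟩ : ∃ b : Nat, (PySem.List.max? ob (fun y => y)).getD 0 = (b : Int) :=
      ⟨_, (Int.toNat_of_nonneg (by omega)).symm⟩
    have ha0 : 0 < a := by omega
    have hb0 : 0 < b := by omega
    rw [pvANormal, haa, hbb, pvAltNormal oa ob a b ha0 hb0 haa hbb]
    have h01 : [(0 : Int), 1] = PySem.List.pyRange 0 (((2 : Nat) : Int)) 1 := by decide
    rw [h01, pvProductRepeat_eq_decode a, pvProductRepeat_eq_decode 2, pvProductRepeat_eq_decode b]
    simp only [List.flatMap_map, List.map_map, Function.comp_def]
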